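-- pv_equiv track=rewrite | github.com/VincentBt/neural_activity_Circular_BP | utils_basic_functions.py | change_order_descending_struct
-- ===== SOURCE A (Python) =====
-- def change_order_descending_struct(list_data_file):
--     list_struct = reversed(['star', 'binary_tree', 'path', 'cycle', 'ladder', 'grid', 'circular_ladder', 'barbell', 'lollipop', 'wheel', 'bipartite', 'tripartite', 'complete'])
--     list_struct_file = list_struct
--     list_data_file_new = []
--     for struct_file in list_struct_file:
--         for file in list_data_file:
--             if struct_file in file and file not in list_data_file_new: #2nd condition: in order to differenciate ladder from circular_ladder
--                 list_data_file_new.append(file)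
-- #     pprint(list_data_file_new)
--     list_data_file = list_data_file_new
--     return list_data_file
-- ===== SOURCE B (Python) =====
-- def change_order_descending_struct(list_data_file):
--     structs = ['complete', 'tripartite', 'bipartite', 'wheel', 'lollipop', 'barbell',
--                'circular_ladder', 'grid', 'ladder', 'cycle', 'path', 'binary_tree', 'star']
--     def rank(f):
--         return next((i for i, s in enumerate(structs) if s in f), None)
--     buckets = [[] for _ in structs]
--     for f in dict.fromkeys(list_data_file):
--         r = rank(f)
--         if r is not None:
--             buckets[r].append(f)
--     return [f for bucket in buckets for f in bucket]
-- ===== Notes on version B (the rewrite author's own statement) =====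
-- stated objective: simpler
-- what changed: A's nested keyword-over-files loops with a membership test on the growing output are replaced by a single pass: dedup the file list once, compute each file's rank (index of its first matching keyword) once, drop unranked files and concatenate the rank buckets.
import Mathlib
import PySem

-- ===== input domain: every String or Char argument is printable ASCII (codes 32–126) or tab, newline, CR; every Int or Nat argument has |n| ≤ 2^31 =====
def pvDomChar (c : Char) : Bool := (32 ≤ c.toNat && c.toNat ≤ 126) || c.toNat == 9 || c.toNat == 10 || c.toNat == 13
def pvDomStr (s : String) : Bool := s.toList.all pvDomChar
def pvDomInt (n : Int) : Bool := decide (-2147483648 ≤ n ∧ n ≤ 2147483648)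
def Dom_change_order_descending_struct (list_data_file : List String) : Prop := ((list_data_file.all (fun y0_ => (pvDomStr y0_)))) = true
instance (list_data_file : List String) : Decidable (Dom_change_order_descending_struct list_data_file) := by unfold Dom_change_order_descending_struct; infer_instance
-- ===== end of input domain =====

-- B replaces A's nested keyword×file scans (with a membership test on the growing output)
-- by a single dedup-then-bucket pass: rank every file once by its first matching keyword
-- and concatenate the buckets ('simpler'; no speed claim).

-- ===== PORT A =====
def change_order_descending_struct (list_data_file : List String) : List String :=
  let list_struct := (["star", "binary_tree", "path", "cycle", "ladder", "grid",
    "circular_ladder", "barbell", "lollipop", "wheel", "bipartite", "tripartite",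
    "complete"]).reverse
  let list_struct_file := list_struct
  list_struct_file.foldl
    (fun list_data_file_new struct_file =>
      list_data_file.foldl
        (fun acc file =>
          if PySem.Str.isIn struct_file file && !(acc.contains file) then acc ++ [file]
          else acc)
        list_data_file_new)
    ([] : List String)

-- ===== PORT B =====
def pvStructsB : List String :=
  ["complete", "tripartite", "bipartite", "wheel", "lollipop", "barbell",
   "circular_ladder", "grid", "ladder", "cycle", "path", "binary_tree", "star"]

-- rank(f) = index of the first keyword occurring in f (next(...) over enumerate)
def pvRank (f : String) : Option Nat :=
  pvStructsB.findIdx? (fun s => PySem.Str.isIn s f)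

def change_order_descending_struct_alt (list_data_file : List String) : List String :=
  let buckets :=
    (PySem.List.dedup list_data_file).foldl
      (fun bs f =>
        match pvRank f with
        | some r => bs.set r ((bs.getD r []) ++ [f])
        | none => bs)
      (List.replicate pvStructsB.length ([] : List String))
  buckets.flatten

-- ===== PRECONDITION & SPEC =====
def Spec_change_order_descending_struct (list_data_file : List String) (out : List String) : Prop := out = change_order_descending_struct_alt list_data_file
instance (list_data_file : List String) (out : List String) : Decidable (Spec_change_order_descending_struct list_data_file out) := by unfold Spec_change_order_descending_struct; infer_instance

-- ===== CLAIM (what is proved, stated in full; the proofs are below) =====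
def Claim_equal_change_order_descending_struct : Prop := ∀ (list_data_file : List String), Dom_change_order_descending_struct list_data_file → Spec_change_order_descending_struct list_data_file (change_order_descending_struct list_data_file)

-- ===== LEMMAS AND PROOFS =====

-- group i = the (dedup'd) files whose first matching keyword has index i
def pvG (fs : List String) (i : Nat) : List String :=
  (PySem.List.dedup fs).filter (fun f => pvRank f == some i)

-- A's inner pass over the files for one keyword s, starting from accumulator acc
def pvOuter (fs : List String) (acc : List String) (s : String) : List String :=
  fs.foldl
    (fun acc file =>
      if PySem.Str.isIn s file && !(acc.contains file) then acc ++ [file] else acc)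
    acc

theorem pv_dedup_cons (x : String) (xs : List String) :
    PySem.List.dedup (x :: xs) = x :: (PySem.List.dedup xs).filter (fun y => !(y == x)) := by
  have h1 : PySem.List.dedup (x :: xs) = PySem.Set.update [x] xs := rfl
  rw [h1, PySem.Set.update_eq_append_filter, List.singleton_append]
  congr 1
  apply List.filter_congr
  intro y _
  have hbd : (y == x) = decide (y = x) := by
    by_cases h : y = x
    · simp [h]
    · simp [h]
  simp [PySem.Set.contains, hbd]

theorem pv_rank_lt {f : String} {i : Nat} (h : pvRank f = some i) : i < 13 := by
  obtain ⟨hlt, -⟩ := List.findIdx?_eq_some_iff_getElem.mp h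
  simpa [pvStructsB] using hlt

theorem pv_inner_eq (s : String) (l : List String) : ∀ (acc : List String),
    pvOuter l acc s
      = acc ++ (PySem.List.dedup l).filter
          (fun f => PySem.Str.isIn s f && !(acc.contains f)) := by
  induction l with
  | nil =>
    intro acc
    show acc = acc ++ (PySem.List.dedup []).filter _
    simp [PySem.List.dedup, PySem.Set.ofList]
  | cons f t ih =>
    intro acc
    have hstep : pvOuter (f :: t) acc s
        = pvOuter t (if PySem.Str.isIn s f && !(acc.contains f) then acc ++ [f] else acc) s := rfl
    rw [hstep, pv_dedup_cons]
    by_cases hc : (PySem.Str.isIn s f && !(acc.contains f)) = true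
    · rw [if_pos hc, ih]
      simp only [List.filter_cons]
      rw [hc, if_pos rfl, List.filter_filter, List.append_assoc, List.singleton_append]
      congr 2
      apply List.filter_congr
      intro y _
      by_cases hyf : y = f
      · subst hyf
        simp
      · simp [hyf]
    · rw [if_neg hc, ih]
      rw [Bool.not_eq_true] at hc
      simp only [List.filter_cons]
      rw [hc, if_neg (by simp), List.filter_filter]
      congr 1
      apply List.filter_congr
      intro y _
      by_cases hyf : y = f
      · subst hyf
        rw [hc]
        simp
      · simp [hyf]

theorem pv_mem_accj {fs : List String} {f : String} {j : Nat}
    (hu : f ∈ PySem.List.dedup fs) :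
    f ∈ (List.range j).flatMap (pvG fs) ↔ ∃ i, i < j ∧ pvRank f = some i := by
  constructor
  · intro h
    obtain ⟨i, hi, hf⟩ := List.mem_flatMap.mp h
    refine ⟨i, List.mem_range.mp hi, ?_⟩
    have := (List.mem_filter.mp hf).2
    simpa using this
  · rintro ⟨i, hij, hr⟩
    exact List.mem_flatMap.mpr ⟨i, List.mem_range.mpr hij,
      List.mem_filter.mpr ⟨hu, by simp [hr]⟩⟩

theorem pv_stepA (fs : List String) (s : String) {j : Nat} (hj : j < 13)
    (hs : pvStructsB.getD j "" = s) :
    pvOuter fs ((List.range j).flatMap (pvG fs)) s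
      = (List.range (j + 1)).flatMap (pvG fs) := by
  have hlen : j < pvStructsB.length := by simpa [pvStructsB] using hj
  have hsg : pvStructsB[j] = s := by
    rw [← hs, List.getD_eq_getElem?_getD, List.getElem?_eq_getElem hlen]
    rfl
  rw [pv_inner_eq, List.range_succ, List.flatMap_append]
  congr 1
  have hsingle : ([j] : List Nat).flatMap (pvG fs) = pvG fs j := by simp
  rw [hsingle]
  apply List.filter_congr
  intro f hf
  cases h : pvRank f with
  | none =>
    have hnone := List.findIdx?_eq_none_iff.mp h
    have hno : PySem.Str.isIn s f = false := by
      have := hnone _ (List.getElem_mem hlen)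
      rw [hsg] at this
      simpa using this
    rw [hno]
    rfl
  | some i =>
    obtain ⟨hil, hpi, hmin⟩ := List.findIdx?_eq_some_iff_getElem.mp h
    rcases lt_trichotomy i j with hij | rfl | hji
    · have hmem : f ∈ (List.range j).flatMap (pvG fs) := (pv_mem_accj hf).mpr ⟨i, hij, h⟩
      have hcon : ((List.range j).flatMap (pvG fs)).contains f = true := by simpa using hmem
      have hne : ((some i : Option Nat) == some j) = false := by
        simp
        omega
      rw [hcon, hne]
      simp
    · have hnot : f ∉ (List.range i).flatMap (pvG fs) := by
        intro hmem
        obtain ⟨i', hi', hr'⟩ := (pv_mem_accj hf).mp hmem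
        rw [h] at hr'
        have : i' = i := by simpa using hr'.symm
        omega
      have hcon : ((List.range i).flatMap (pvG fs)).contains f = false := by simpa using hnot
      have hin : PySem.Str.isIn s f = true := by
        rw [← hsg]
        simpa using hpi
      rw [hcon, hin]
      simp
    · have hno : PySem.Str.isIn s f = false := by
        have := hmin j hji
        rw [hsg] at this
        simpa using this
      have hne : ((some i : Option Nat) == some j) = false := by
        simp
        omega
      rw [hno, hne]
      rfl

theorem pv_chain (fs : List String) : ∀ (t : List String), t <:+ pvStructsB →
    t.foldl (pvOuter fs) ((List.range (13 - t.length)).flatMap (pvG fs))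
      = (List.range 13).flatMap (pvG fs) := by
  intro t
  induction t with
  | nil => intro _; rfl
  | cons s t ih =>
    intro hsuf
    have ht : t <:+ pvStructsB := (List.suffix_cons s t).trans hsuf
    have hlen : t.length + 1 ≤ 13 := by simpa [pvStructsB] using hsuf.length_le
    obtain ⟨pre, hpre⟩ := hsuf
    have hplen : pre.length = 13 - (t.length + 1) := by
      have h13 := congrArg List.length hpre
      simp [pvStructsB] at h13
      omega
    have hs : pvStructsB.getD pre.length "" = s := by
      rw [← hpre, List.getD_eq_getElem?_getD, List.getElem?_append_right (le_refl _)]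
      simp
    rw [List.foldl_cons]
    have hidx : 13 - (s :: t).length = pre.length := by
      simp only [List.length_cons]
      omega
    rw [hidx, pv_stepA fs s (by omega) hs]
    have hidx2 : pre.length + 1 = 13 - t.length := by omega
    rw [hidx2]
    exact ih ht

theorem pv_A_eq (fs : List String) :
    change_order_descending_struct fs = (List.range 13).flatMap (pvG fs) := by
  have h0 : change_order_descending_struct fs = pvStructsB.foldl (pvOuter fs) [] := rfl
  have h := pv_chain fs pvStructsB (List.suffix_refl _)
  have hz : (13 - pvStructsB.length) = 0 := by simp [pvStructsB]
  rw [hz] at h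
  simpa using h0.trans h

theorem pv_getD_map {n r : Nat} (hr : r < n) (b : Nat → List String) :
    ((List.range n).map b).getD r [] = b r := by
  rw [List.getD_eq_getElem?_getD]
  simp [List.getElem?_range hr]

theorem pv_set_map {n r : Nat} (b : Nat → List String) (v : List String) :
    ((List.range n).map b).set r v
      = (List.range n).map (fun i => if i = r then v else b i) := by
  apply List.ext_getElem
  · simp
  · intro k h1 h2
    simp only [List.getElem_set, List.getElem_map, List.getElem_range]
    by_cases h : r = k
    · simp [h]
    · rw [if_neg h, if_neg (fun hh : k = r => h hh.symm)]

theorem pv_loopB : ∀ (l : List String) (b : Nat → List String),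
    l.foldl
      (fun bs f =>
        match pvRank f with
        | some r => bs.set r ((bs.getD r []) ++ [f])
        | none => bs)
      ((List.range 13).map b)
      = (List.range 13).map (fun i => b i ++ l.filter (fun f => pvRank f == some i)) := by
  intro l
  induction l with
  | nil => intro b; simp
  | cons f t ih =>
    intro b
    rw [List.foldl_cons]
    cases h : pvRank f with
    | none =>
      simp only [h]
      rw [ih]
      apply List.map_congr_left
      intro i _
      rw [List.filter_cons_of_neg (by simp [h])]
    | some r =>
      have hr : r < 13 := pv_rank_lt h
      simp only [h]
      rw [pv_getD_map hr, pv_set_map, ih]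
      apply List.map_congr_left
      intro i _
      by_cases hir : i = r
      · subst hir
        rw [List.filter_cons_of_pos (by simp [h]), if_pos rfl]
        simp
      · rw [List.filter_cons_of_neg (by simp [h]; omega), if_neg hir]

theorem pv_B_eq (fs : List String) :
    change_order_descending_struct_alt fs = (List.range 13).flatMap (pvG fs) := by
  have hrep : List.replicate pvStructsB.length ([] : List String)
      = (List.range 13).map (fun _ => []) := rfl
  show ((PySem.List.dedup fs).foldl _ (List.replicate pvStructsB.length ([] : List String))).flatten = _
  rw [hrep, pv_loopB]
  simp only [List.nil_append]
  rw [← List.flatMap_def]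
  rfl

-- ===== VERDICT (by name: the statement is the Claim_ definition above) =====
theorem change_order_descending_struct_spec : Claim_equal_change_order_descending_struct := by
  intro fs _
  unfold Spec_change_order_descending_struct
  rw [pv_A_eq, pv_B_eq]
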